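-- pv_equiv track=rewrite | github.com/skookumer/GMO | CHARM_algo_ZSM/CHARM.py | support_count
-- ===== SOURCE A (Python) =====
-- from functools import reduce
-- import operator
--
-- def support_count(itemset, item2tids):
--     """Absolute support via TID-set intersections (0 if any item is unseen)."""
--     if not itemset:
--         return 0
--     try:
--         tidsets = [item2tids[i] for i in itemset]
--     except KeyError:
--         return 0
--     return len(reduce(operator.and_, tidsets))
-- ===== SOURCE B (Python) =====
-- def support_count(itemset, item2tids):
--     """Absolute support via a single-pass TID tally (0 if any item is unseen)."""
--     counts = {}
--     for i in itemset:
--         if i not in item2tids: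
--             return 0
--         for t in item2tids[i]:
--             counts[t] = counts.get(t, 0) + 1
--     n = len(itemset)
--     return sum(1 for c in counts.values() if c == n)
-- ===== Notes on version B (the rewrite author's own statement) =====
-- stated objective: alternative
-- what changed: Replaces the two-stage build-all-tidsets-then-reduce(operator.and_) intersection chain by one fused pass over the itemset that tallies every TID in a counter (early-returning 0 on an unseen item) and returns the number of TIDs whose tally equals len(itemset); the empty itemset needs no guard since the empty tally yields 0.
import Mathlib
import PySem

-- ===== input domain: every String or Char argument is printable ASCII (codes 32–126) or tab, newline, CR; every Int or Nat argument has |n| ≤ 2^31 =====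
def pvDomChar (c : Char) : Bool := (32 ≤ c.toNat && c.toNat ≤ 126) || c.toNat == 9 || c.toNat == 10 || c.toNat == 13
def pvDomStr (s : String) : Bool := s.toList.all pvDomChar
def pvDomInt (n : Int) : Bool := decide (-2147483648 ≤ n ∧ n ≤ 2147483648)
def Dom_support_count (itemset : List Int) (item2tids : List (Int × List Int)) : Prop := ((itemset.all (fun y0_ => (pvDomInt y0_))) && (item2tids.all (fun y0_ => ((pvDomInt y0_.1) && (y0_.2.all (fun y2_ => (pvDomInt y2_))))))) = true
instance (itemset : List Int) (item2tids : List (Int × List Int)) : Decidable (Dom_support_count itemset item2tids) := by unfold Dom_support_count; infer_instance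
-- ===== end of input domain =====

-- B fuses lookup and counting into one pass over the itemset, tallying every TID in a counter
-- and counting TIDs whose tally equals len(itemset); same value, alternative decomposition.


-- ===== PORT A =====
-- 'tidsets = [item2tids[i] for i in itemset]' with the surrounding try/except KeyError:
-- none = the comprehension raised KeyError (dict lookup = first match in the association list).
def collectTids (itemset : List Int) (item2tids : List (Int × List Int)) : Option (List (List Int)) :=
  match itemset with
  | [] => some []
  | i :: rest =>
    match item2tids.lookup i with
    | none => none
    | some ts => (collectTids rest item2tids).map (ts :: ·)

def support_count (itemset : List Int) (item2tids : List (Int × List Int)) : Int :=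
  if itemset.isEmpty then 0
  else
    match collectTids itemset item2tids with
    | none => 0
    | some tidsets =>
      match tidsets with
      | [] => 0  -- unreachable: itemset nonempty gives a nonempty tidsets (reduce never sees [])
      | t0 :: restSets =>
        ((restSets.foldl (fun acc ts => PySem.Set.inter acc ts) t0).length : Int)

-- ===== PORT B =====
-- the fused loop of Source B: tally the counter item by item; none = 'return 0' on an unseen item
def tally (itemset : List Int) (item2tids : List (Int × List Int)) : Option (PySem.Dict Int Int) :=
  itemset.foldl
    (fun acc i => acc.bind (fun counts =>
      match item2tids.lookup i with
      | none => none
      | some ts => some (ts.foldl (fun d t => d.insert t (d.getD t 0 + 1)) counts)))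
    (some PySem.Dict.empty)

def support_count_alt (itemset : List Int) (item2tids : List (Int × List Int)) : Int :=
  match tally itemset item2tids with
  | none => 0
  | some counts =>
    ((counts.values.filter (fun c => c == (itemset.length : Int))).length : Int)

-- ===== PRECONDITION & SPEC =====
-- Pre_ only states the Python type of the dict values: each value encodes a Python set
-- (the TID-set), so its list of elements has no duplicates; no Python input is excluded.
def Pre_support_count (itemset : List Int) (item2tids : List (Int × List Int)) : Prop :=
  ∀ p ∈ item2tids, p.2.Nodup
instance (itemset : List Int) (item2tids : List (Int × List Int)) : Decidable (Pre_support_count itemset item2tids) := by unfold Pre_support_count; infer_instance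

def pvWitness_support_count : List Int × (List (Int × List Int)) := ([1, 2], [(1, [5, 7]), (2, [7])])

def Spec_support_count (itemset : List Int) (item2tids : List (Int × List Int)) (out : Int) : Prop := out = support_count_alt itemset item2tids
instance (itemset : List Int) (item2tids : List (Int × List Int)) (out : Int) : Decidable (Spec_support_count itemset item2tids out) := by unfold Spec_support_count; infer_instance

-- ===== CLAIM (what is proved, stated in full; the proofs are below) =====
def Claim_equal_support_count : Prop := ∀ (itemset : List Int) (item2tids : List (Int × List Int)), Dom_support_count itemset item2tids → Pre_support_count itemset item2tids → Spec_support_count itemset item2tids (support_count itemset item2tids)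

-- ===== LEMMAS AND PROOFS =====

-- folding Source B's step over a 'none' (already-returned) accumulator stays 'none'
theorem foldl_step_none (item2tids : List (Int × List Int)) (l : List Int) :
    l.foldl
      (fun acc i => acc.bind (fun (counts : PySem.Dict Int Int) =>
        match item2tids.lookup i with
        | none => none
        | some ts => some (ts.foldl (fun d t => d.insert t (d.getD t 0 + 1)) counts)))
      none = none := by
  induction l with
  | nil => rfl
  | cons j r ihr => simp only [List.foldl_cons, Option.bind_none]; exact ihr

-- B's fused loop = A's staged comprehension followed by the tidset-by-tidset tally
theorem tally_eq_collect (itemset : List Int) (item2tids : List (Int × List Int)) :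
    tally itemset item2tids
      = (collectTids itemset item2tids).map
          (fun tidsets => tidsets.foldl
            (fun d ts => ts.foldl (fun d t => d.insert t (d.getD t 0 + 1)) d)
            PySem.Dict.empty) := by
  suffices h : ∀ (d : PySem.Dict Int Int),
      itemset.foldl
        (fun acc i => acc.bind (fun counts =>
          match item2tids.lookup i with
          | none => none
          | some ts => some (ts.foldl (fun d t => d.insert t (d.getD t 0 + 1)) counts)))
        (some d)
      = (collectTids itemset item2tids).map
          (fun tidsets => tidsets.foldl
            (fun d ts => ts.foldl (fun d t => d.insert t (d.getD t 0 + 1)) d) d) by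
    exact h PySem.Dict.empty
  induction itemset with
  | nil => intro d; rfl
  | cons i rest ih =>
    intro d
    simp only [List.foldl_cons, collectTids, Option.bind_some]
    cases item2tids.lookup i with
    | none =>
      simpa using foldl_step_none item2tids rest
    | some ts =>
      simp only [ih]
      cases collectTids rest item2tids with
      | none => rfl
      | some l => rfl

theorem collectTids_length (itemset : List Int) (item2tids : List (Int × List Int))
    (tidsets : List (List Int)) (h : collectTids itemset item2tids = some tidsets) :
    tidsets.length = itemset.length := by
  induction itemset generalizing tidsets with
  | nil => simp [collectTids] at h; subst h; rfl
  | cons i rest ih =>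
    simp only [collectTids] at h
    cases hl : item2tids.lookup i with
    | none => rw [hl] at h; simp at h
    | some ts =>
      rw [hl] at h
      cases hcr : collectTids rest item2tids with
      | none => rw [hcr] at h; simp at h
      | some tl =>
        rw [hcr] at h
        simp only [Option.map_some, Option.some.injEq] at h
        subst h
        simp [ih tl hcr]

-- every tidset produced by the comprehension is a value of the dict
theorem mem_collectTids (itemset : List Int) (item2tids : List (Int × List Int))
    (tidsets : List (List Int)) (h : collectTids itemset item2tids = some tidsets) :
    ∀ ts ∈ tidsets, ∃ i, item2tids.lookup i = some ts := by
  induction itemset generalizing tidsets with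
  | nil => simp [collectTids] at h; subst h; simp
  | cons i rest ih =>
    simp only [collectTids] at h
    cases hl : item2tids.lookup i with
    | none => rw [hl] at h; simp at h
    | some ts0 =>
      rw [hl] at h
      cases hcr : collectTids rest item2tids with
      | none => rw [hcr] at h; simp at h
      | some tl =>
        rw [hcr] at h
        simp only [Option.map_some, Option.some.injEq] at h
        subst h
        intro ts hts
        rw [List.mem_cons] at hts
        rcases hts with rfl | h2
        · exact ⟨i, hl⟩
        · exact ih tl hcr ts h2

theorem lookup_mem {item2tids : List (Int × List Int)} {i : Int} {ts : List Int}
    (h : item2tids.lookup i = some ts) : (i, ts) ∈ item2tids := by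
  induction item2tids with
  | nil => simp [List.lookup] at h
  | cons p rest ih =>
    obtain ⟨k, v⟩ := p
    rw [List.lookup] at h
    by_cases hpi : i = k
    · subst hpi; simp at h; simp [h]
    · simp [beq_false_of_ne hpi] at h
      exact List.mem_cons_of_mem _ (ih h)

-- the intersection fold is a filter on the first tidset
theorem foldl_inter_eq_filter (t0 : List Int) (rest : List (List Int)) :
    rest.foldl (fun acc ts => PySem.Set.inter acc ts) t0
      = t0.filter (fun x => rest.all (fun ts => decide (x ∈ ts))) := by
  induction rest generalizing t0 with
  | nil => simp
  | cons ts rest ih =>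
    rw [List.foldl_cons, ih]
    simp only [PySem.Set.inter]
    rw [List.filter_filter]
    apply List.filter_congr
    intro x _
    simp [List.all_cons, Bool.and_comm]

-- two Nodup lists count the same elements
theorem countP_eq_countP_of_nodup (l₁ l₂ : List Int) (q₁ q₂ : Int → Bool)
    (h₁ : l₁.Nodup) (h₂ : l₂.Nodup)
    (h : ∀ x, (x ∈ l₁ ∧ q₁ x) ↔ (x ∈ l₂ ∧ q₂ x)) :
    l₁.countP q₁ = l₂.countP q₂ := by
  rw [List.countP_eq_length_filter, List.countP_eq_length_filter]
  apply List.Perm.length_eq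
  apply (List.perm_ext_iff_of_nodup (h₁.filter _) (h₂.filter _)).2
  intro x
  simp only [List.mem_filter]
  exact h x

theorem count_flatten_le_length (l : List (List Int)) (k : Int)
    (hnd : ∀ ts ∈ l, ts.Nodup) : l.flatten.count k ≤ l.length := by
  induction l with
  | nil => simp
  | cons ts rest ih =>
    have hle1 : ts.count k ≤ 1 := (List.nodup_iff_count_le_one.1 (hnd ts (by simp))) k
    have := ih (fun t ht => hnd t (by simp [ht]))
    simp only [List.flatten_cons, List.count_append, List.length_cons]
    omega

-- the tally over flattened Nodup tidsets reaches the number of tidsets exactly on common TIDs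
theorem count_flatten_eq_length_iff (l : List (List Int)) (k : Int)
    (hnd : ∀ ts ∈ l, ts.Nodup) :
    (l.flatten.count k = l.length) ↔ (∀ ts ∈ l, k ∈ ts) := by
  induction l with
  | nil => simp
  | cons ts rest ih =>
    have hts : ts.Nodup := hnd ts (by simp)
    have hrest : ∀ t ∈ rest, t.Nodup := fun t ht => hnd t (by simp [ht])
    have hle1 : ts.count k ≤ 1 := (List.nodup_iff_count_le_one.1 hts) k
    have hleR : rest.flatten.count k ≤ rest.length := count_flatten_le_length rest k hrest
    rw [List.flatten_cons, List.count_append]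
    simp only [List.length_cons, List.mem_cons]
    constructor
    · intro h
      have h1 : ts.count k = 1 := by omega
      have h2 : rest.flatten.count k = rest.length := by omega
      have hk : k ∈ ts := by rw [← List.count_pos_iff]; omega
      intro t ht
      rcases ht with rfl | ht
      · exact hk
      · exact ((ih hrest).1 h2) t ht
    · intro h
      have h1 : ts.count k = 1 := by
        have : 0 < ts.count k := List.count_pos_iff.2 (h ts (Or.inl rfl))
        omega
      have h2 : rest.flatten.count k = rest.length := (ih hrest).2 (fun t ht => h t (Or.inr ht))
      omega

-- the counter of the staged tally, filtered at the threshold, as a countP over the deduped flatten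
theorem tally_tail_eq_countP (tidsets : List (List Int)) :
    ((((tidsets.foldl (fun d ts => ts.foldl (fun d t => d.insert t (d.getD t 0 + 1)) d)
        PySem.Dict.empty).values.filter (fun c => c == (tidsets.length : Int))).length) : Int)
      = ((PySem.Set.ofList tidsets.flatten).countP
          (fun k => (tidsets.flatten.count k : Int) == (tidsets.length : Int)) : Int) := by
  have hfold : tidsets.foldl (fun d ts => ts.foldl (fun d t => d.insert t (d.getD t 0 + 1)) d)
      (PySem.Dict.empty : PySem.Dict Int Int)
      = PySem.Dict.counter tidsets.flatten := by
    rw [← PySem.Dict.foldl_insert_getD_add_one_eq_counter, ← List.foldl_flatten]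
  rw [hfold]
  have hv : (PySem.Dict.counter tidsets.flatten : PySem.Dict Int Int).values
      = (PySem.Set.ofList tidsets.flatten).map (fun k => (tidsets.flatten.count k : Int)) := by
    have := PySem.Dict.items_counter (xs := tidsets.flatten)
    simp only [PySem.Dict.values, this, List.map_map]
    rfl
  rw [hv, List.filter_map, List.length_map, ← List.countP_eq_length_filter]
  rfl

-- ===== VERDICT (by name: the statement is the Claim_ definition above) =====
theorem support_count_spec : Claim_equal_support_count := by
  intro itemset item2tids _ hpre
  unfold Spec_support_count
  cases itemset with
  | nil => rfl
  | cons i0 irest =>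
    cases hc : collectTids (i0 :: irest) item2tids with
    | none =>
      simp [support_count, support_count_alt, tally_eq_collect, hc]
    | some tidsets =>
      have hmem : ∀ ts ∈ tidsets, ts.Nodup := by
        intro ts hts
        obtain ⟨i, hi⟩ := mem_collectTids _ _ _ hc ts hts
        exact hpre (i, ts) (lookup_mem hi)
      have hlen : tidsets.length = (i0 :: irest).length := collectTids_length _ _ _ hc
      cases tidsets with
      | nil => simp at hlen
      | cons t0 restSets =>
        have hA : support_count (i0 :: irest) item2tids
            = ((restSets.foldl (fun acc ts => PySem.Set.inter acc ts) t0).length : Int) := by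
          simp [support_count, hc]
        have hB : support_count_alt (i0 :: irest) item2tids
            = (((((t0 :: restSets).foldl
                  (fun d ts => ts.foldl (fun d t => d.insert t (d.getD t 0 + 1)) d)
                  PySem.Dict.empty).values.filter
                    (fun c => c == ((t0 :: restSets).length : Int))).length) : Int) := by
          simp [support_count_alt, tally_eq_collect, hc, hlen]
        rw [hA, hB, tally_tail_eq_countP, foldl_inter_eq_filter, ← List.countP_eq_length_filter]
        congr 1
        apply countP_eq_countP_of_nodup
        · exact hmem t0 (by simp)
        · exact PySem.Set.nodup_ofList _
        · intro x
          constructor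
          · rintro ⟨hx, hall⟩
            simp only [List.all_eq_true, decide_eq_true_eq] at hall
            have hin : ∀ ts ∈ t0 :: restSets, x ∈ ts := by
              intro ts hts
              rcases List.mem_cons.1 hts with rfl | hts'
              · exact hx
              · exact hall ts hts'
            refine ⟨?_, ?_⟩
            · rw [PySem.Set.mem_ofList, List.mem_flatten]
              exact ⟨t0, by simp, hx⟩
            · rw [beq_iff_eq, Int.natCast_inj]
              exact (count_flatten_eq_length_iff _ x hmem).2 hin
          · rintro ⟨hx, hcnt⟩
            rw [beq_iff_eq, Int.natCast_inj] at hcnt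
            have hin := (count_flatten_eq_length_iff _ x hmem).1 hcnt
            refine ⟨hin t0 (by simp), ?_⟩
            simp only [List.all_eq_true, decide_eq_true_eq]
            intro ts hts
            exact hin ts (by simp [hts])
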